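-- pv_equiv track=rewrite | github.com/Unkovskyi/PyBase08 | hw_4_2.py | clear_word
-- ===== SOURCE A (Python) =====
-- import string
--
-- def clear_word(word, filterstr):  # функция по очистке слова от заданных символов
--     all_s = string.punctuation + string.whitespace + string.digits + string.ascii_letters
--     result = word
--     for i in range(len(word)):
--         if word[i] in filterstr:
--             result = result.replace(word[i], '')
--         elif word[i] not in all_s:
--             raise ValueError(word[i], i)
--     return result
-- ===== SOURCE B (Python) =====
-- import string
--
--
-- def clear_word(word, filterstr):
--     # validate first: raise at the first char that is neither a filter char
--     # nor a member of all_s (same exception, same order as the original)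
--     all_s = string.punctuation + string.whitespace + string.digits + string.ascii_letters
--     for i, c in enumerate(word):
--         if c not in filterstr and c not in all_s:
--             raise ValueError(c, i)
--     # single pass: drop every filter char using a prebuilt set
--     drop = set(filterstr)
--     return ''.join(c for c in word if c not in drop)
-- ===== Notes on version B (the rewrite author's own statement) =====
-- stated objective: faster
-- what changed: A calls str.replace inside the loop, rescanning the whole shrinking result once per character of word that is in filterstr; B validates in one pass and then builds the output in a single filtering pass against a prebuilt set of the filter characters.
import Mathlib
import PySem

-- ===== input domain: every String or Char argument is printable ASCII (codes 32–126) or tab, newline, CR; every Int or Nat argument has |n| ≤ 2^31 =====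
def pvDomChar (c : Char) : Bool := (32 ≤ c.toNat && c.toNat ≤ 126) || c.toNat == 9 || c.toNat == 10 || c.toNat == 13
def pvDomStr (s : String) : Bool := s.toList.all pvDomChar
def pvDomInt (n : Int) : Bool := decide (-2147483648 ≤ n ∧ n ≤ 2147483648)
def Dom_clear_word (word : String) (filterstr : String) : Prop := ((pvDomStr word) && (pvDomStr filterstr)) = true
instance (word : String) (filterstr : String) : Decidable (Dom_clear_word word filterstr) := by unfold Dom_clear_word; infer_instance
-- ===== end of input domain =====

-- B replaces A's per-character str.replace rescans with one validation pass plus one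
-- filtering pass
-- against a prebuilt set of the filter characters (single pass instead of repeated rescans).
-- ===== PORT A =====
-- string.punctuation + string.whitespace + string.digits + string.ascii_letters
def pvAllS : String := "!\"#$%&'()*+,-./:;<=>?@[\\]^_`{|}~ \x09\x0a\x0d\x0b\x0c0123456789abcdefghijklmnopqrstuvwxyzABCDEFGHIJKLMNOPQRSTUVWXYZ"

-- Port of A: for each character of word (in order), if it is in filterstr the whole
-- current result is rescanned by str.replace; the `raise ValueError` branch is
-- unreachable on Dom_clear_word (every Dom character is in all_s), so it keeps result.
def clear_word (word : String) (filterstr : String) : String :=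
  word.toList.foldl
    (fun result c =>
      if PySem.Str.isIn (String.ofList [c]) filterstr then
        PySem.Str.replace result (String.ofList [c]) ""
      else if !(PySem.Str.isIn (String.ofList [c]) pvAllS) then
        result  -- raise ValueError(c, i): unreachable inside Dom_clear_word
      else
        result)
    word

-- ===== PORT B =====
-- Port of B: one validation pass (the raise is unreachable inside Dom_clear_word,
-- so the pass is a no-op), then one filtering pass against the prebuilt set.
def clear_word_alt (word : String) (filterstr : String) : String :=
  let _valid := word.toList.all
    (fun c => PySem.Str.isIn (String.ofList [c]) filterstr || PySem.Str.isIn (String.ofList [c]) pvAllS)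
  let drop : PySem.Set Char := PySem.Set.ofList filterstr.toList
  String.ofList (word.toList.filter (fun c => !(drop.contains c)))

-- ===== PRECONDITION & SPEC =====
def Spec_clear_word (word : String) (filterstr : String) (out : String) : Prop := out = clear_word_alt word filterstr
instance (word : String) (filterstr : String) (out : String) : Decidable (Spec_clear_word word filterstr out) := by unfold Spec_clear_word; infer_instance

-- ===== CLAIM (what is proved, stated in full; the proofs are below) =====
def Claim_equal_clear_word : Prop := ∀ (word : String) (filterstr : String), Dom_clear_word word filterstr → Spec_clear_word word filterstr (clear_word word filterstr)

-- ===== LEMMAS AND PROOFS =====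

-- str.replace with a single-char pattern and empty replacement is a filter
theorem pv_replace_go_single (a : Char) :
    ∀ (fuel : Nat) (l acc : List Char), l.length ≤ fuel →
      PySem.Chars.replace.go [a] [] fuel l acc = acc.reverse ++ l.filter (· ≠ a) := by
  intro fuel
  induction fuel with
  | zero =>
    intro l acc h
    have : l = [] := List.eq_nil_of_length_eq_zero (Nat.le_zero.mp h)
    subst this
    simp [PySem.Chars.replace.go]
  | succ n ih =>
    intro l acc h
    cases l with
    | nil => simp [PySem.Chars.replace.go]
    | cons c t =>
      simp only [List.length_cons, Nat.succ_le_succ_iff] at h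
      by_cases hc : c = a
      · subst hc
        have : List.isPrefixOf [c] (c :: t) = true := by
          simp [List.isPrefixOf]
        rw [PySem.Chars.replace.go]
        simp only [this, if_pos]
        rw [show List.drop (List.length [c]) (c :: t) = t by simp]
        rw [ih t _ h]
        simp
      · have : List.isPrefixOf [a] (c :: t) = true ↔ False := by
          simp [List.isPrefixOf]
          exact fun h' => hc h'.symm
        rw [PySem.Chars.replace.go]
        split
        · rename_i hp; exact absurd hp this.mp
        · rw [ih t _ h]
          simp [hc]

theorem pv_replace_single (l : List Char) (a : Char) :
    PySem.Chars.replace l [a] [] = l.filter (· ≠ a) := by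
  rw [PySem.Chars.replace]
  rw [if_neg (by simp)]
  exact pv_replace_go_single a l.length l [] (le_refl _)

-- single-char `c in s` is list membership
theorem pv_isIn_single (c : Char) (s : String) :
    PySem.Str.isIn (String.ofList [c]) s = true ↔ c ∈ s.toList := by
  rw [PySem.Str.isIn_iff_infix]
  constructor
  · intro ⟨p, q, h⟩
    rw [← h]; simp [String.toList_ofList]
  · intro h
    obtain ⟨p, q, h⟩ := List.append_of_mem h
    exact ⟨p, q, by simp [h, String.toList_ofList]⟩

-- the A-side fold, rephrased on lists
def pvStepL (fl : List Char) (r : List Char) (c : Char) : List Char :=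
  if c ∈ fl then r.filter (· ≠ c) else r

theorem pv_foldl_toList (filterstr : String) :
    ∀ (cs : List Char) (r : String),
      (cs.foldl
        (fun result c =>
          if PySem.Str.isIn (String.ofList [c]) filterstr then
            PySem.Str.replace result (String.ofList [c]) ""
          else if !(PySem.Str.isIn (String.ofList [c]) pvAllS) then result
          else result) r).toList
      = cs.foldl (pvStepL filterstr.toList) r.toList := by
  intro cs
  induction cs with
  | nil => intro r; simp
  | cons c t ih =>
    intro r
    simp only [List.foldl_cons]
    by_cases hc : c ∈ filterstr.toList
    · rw [if_pos ((pv_isIn_single c filterstr).mpr hc), ih]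
      have : (PySem.Str.replace r (String.ofList [c]) "").toList = r.toList.filter (· ≠ c) := by
        rw [PySem.Str.toList_replace]
        simp only [String.toList_ofList]
        have h0 : ("" : String).toList = [] := rfl
        rw [h0, pv_replace_single]
      rw [this, pvStepL, if_pos hc]
    · rw [if_neg (fun h => hc ((pv_isIn_single c filterstr).mp h))]
      rw [pvStepL, if_neg hc]
      split <;> exact ih r

-- the fold removes exactly the filter chars that occur in the processed suffix
theorem pv_foldl_filter (fl : List Char) :
    ∀ (cs r0 : List Char),
      cs.foldl (pvStepL fl) r0 = r0.filter (fun x => decide (x ∉ fl ∨ x ∉ cs)) := by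
  intro cs
  induction cs with
  | nil => intro r0; simp
  | cons c t ih =>
    intro r0
    simp only [List.foldl_cons, pvStepL]
    by_cases hc : c ∈ fl
    · rw [if_pos hc, ih, List.filter_filter]
      apply List.filter_congr
      intro x _
      by_cases hx : x ∈ fl
      · by_cases hxc : x = c <;> simp [hx, hxc, hc]
      · have : x ≠ c := fun h => hx (h ▸ hc)
        simp [hx, this]
    · rw [if_neg hc, ih]
      apply List.filter_congr
      intro x _
      by_cases hx : x ∈ fl
      · have : x ≠ c := fun h => hc (h ▸ hx)
        simp [hx, this]
      · simp [hx]

-- ===== VERDICT (by name: the statement is the Claim_ definition above) =====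
theorem clear_word_spec : Claim_equal_clear_word := by
  intro word filterstr _
  unfold Spec_clear_word
  have hA : (clear_word word filterstr).toList
      = word.toList.filter (fun x => decide (x ∉ filterstr.toList ∨ x ∉ word.toList)) := by
    unfold clear_word
    rw [pv_foldl_toList, pv_foldl_filter]
  have hB : (clear_word_alt word filterstr).toList
      = word.toList.filter (fun c => !((PySem.Set.ofList filterstr.toList).contains c)) := by
    unfold clear_word_alt
    simp [String.toList_ofList]
  apply String.toList_inj.mp
  rw [hA, hB]
  apply List.filter_congr
  intro x hx
  have hmem : (PySem.Set.ofList filterstr.toList).contains x = true ↔ x ∈ filterstr.toList := by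
    rw [PySem.Set.contains_iff]
    exact PySem.Set.mem_ofList _ _
  by_cases hf : x ∈ filterstr.toList
  · simp only [hmem.mpr hf, Bool.not_true, decide_eq_false_iff_not]
    simp [hf, hx]
  · simp [hf]
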